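-- pv_equiv track=rewrite | github.com/EmilioPeJu/problems | codefights/reduceString.py | reduceString
-- ===== SOURCE A (Python) =====
-- def reduceString(inputString):
--     i=0
--     while 2*i<len(inputString) and inputString[i]==inputString[len(inputString)-i-1]:
--         i+=1
--     if 2*i >=len(inputString):
--         return ""
--     res=inputString[i:len(inputString)-i]
--     return res
-- ===== SOURCE B (Python) =====
-- def reduceString(inputString):
--     s = inputString
--     while len(s) > 1 and s[0] == s[-1]:
--         s = s[1:-1]
--     return s if len(s) > 1 else ""
-- ===== Notes on version B (the rewrite author's own statement) =====
-- stated objective: simpler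
-- what changed: Replaces the index-counting while loop plus final slice with a direct peel that repeatedly strips the matching end characters from a shrinking string, needing no index arithmetic or slice computation.
import Mathlib
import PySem

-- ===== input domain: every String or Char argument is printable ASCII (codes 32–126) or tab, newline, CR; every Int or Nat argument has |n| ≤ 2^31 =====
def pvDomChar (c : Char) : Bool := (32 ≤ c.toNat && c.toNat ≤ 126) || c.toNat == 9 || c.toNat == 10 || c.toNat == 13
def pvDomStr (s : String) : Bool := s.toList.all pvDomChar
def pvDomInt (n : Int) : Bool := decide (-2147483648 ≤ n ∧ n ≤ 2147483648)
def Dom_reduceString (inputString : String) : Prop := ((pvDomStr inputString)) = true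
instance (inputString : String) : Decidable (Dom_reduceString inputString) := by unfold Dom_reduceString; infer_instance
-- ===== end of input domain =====

-- B strips matching end characters from a shrinking string instead of A's index counting + final slice; objective: simpler.

-- ===== PORT A =====
-- A's while loop: advance i while 2*i < len(s) and s[i] == s[len(s)-i-1] (both indices in range there)
def loopA (l : List Char) (i : Nat) : Nat :=
  if h : 2 * i < l.length ∧ l.getD i ' ' = l.getD (l.length - i - 1) ' ' then
    loopA l (i + 1)
  else i
termination_by l.length - i
decreasing_by omega

def reduceString (inputString : String) : String :=
  let l := inputString.toList
  let i := loopA l 0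
  if l.length ≤ 2 * i then ""
  else String.ofList (PySem.List.slice l (some (i : Int)) (some ((l.length - i : Nat) : Int)))

-- ===== PORT B =====
-- B's while loop: peel the string while len(s) > 1 and s[0] == s[-1]
def peelB (l : List Char) : List Char :=
  if _h : 1 < l.length ∧ l.head? = l.getLast? then
    peelB ((l.drop 1).dropLast)
  else l
termination_by l.length
decreasing_by simp; omega

def reduceString_alt (inputString : String) : String :=
  let r := peelB inputString.toList
  if r.length ≤ 1 then "" else String.ofList r

-- ===== PRECONDITION & SPEC =====
def Spec_reduceString (inputString : String) (out : String) : Prop := out = reduceString_alt inputString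
instance (inputString : String) (out : String) : Decidable (Spec_reduceString inputString out) := by unfold Spec_reduceString; infer_instance

-- ===== CLAIM (what is proved, stated in full; the proofs are below) =====
def Claim_equal_reduceString : Prop := ∀ (inputString : String), Dom_reduceString inputString → Spec_reduceString inputString (reduceString inputString)

-- ===== LEMMAS AND PROOFS =====

-- list-level results of the two ports
def listA (l : List Char) : List Char :=
  if l.length ≤ 2 * loopA l 0 then []
  else PySem.List.slice l (some ((loopA l 0 : Nat) : Int)) (some ((l.length - loopA l 0 : Nat) : Int))

def listB (l : List Char) : List Char :=
  if (peelB l).length ≤ 1 then [] else peelB l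

lemma getD_mid (a : Char) (m : List Char) (i : Nat) (hi : i < m.length) :
    (a :: (m ++ [a])).getD (i + 1) ' ' = m.getD i ' ' := by
  simp [List.getD, List.getElem?_append_left hi]

-- A's loop condition on a :: m ++ [a] at index i+1 is its condition on m at index i
lemma condA_iff (a : Char) (m : List Char) (i : Nat) :
    (2 * (i + 1) < (a :: (m ++ [a])).length ∧
      (a :: (m ++ [a])).getD (i + 1) ' ' = (a :: (m ++ [a])).getD ((a :: (m ++ [a])).length - (i + 1) - 1) ' ')
    ↔ (2 * i < m.length ∧ m.getD i ' ' = m.getD (m.length - i - 1) ' ') := by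
  have hlen : (a :: (m ++ [a])).length = m.length + 2 := by simp
  constructor
  · rintro ⟨h1, h2⟩
    rw [hlen] at h1 h2
    have hi : i < m.length := by omega
    have hlt : m.length - i - 1 < m.length := by omega
    have e3 : m.length + 2 - (i + 1) - 1 = (m.length - i - 1) + 1 := by omega
    rw [getD_mid a m i hi, e3, getD_mid a m _ hlt] at h2
    exact ⟨by omega, h2⟩
  · rintro ⟨h1, h2⟩
    rw [hlen]
    have hi : i < m.length := by omega
    have hlt : m.length - i - 1 < m.length := by omega
    have e3 : m.length + 2 - (i + 1) - 1 = (m.length - i - 1) + 1 := by omega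
    rw [getD_mid a m i hi, e3, getD_mid a m _ hlt]
    exact ⟨by omega, h2⟩

lemma loopA_shift (a : Char) (m : List Char) (i : Nat) :
    loopA (a :: (m ++ [a])) (i + 1) = loopA m i + 1 := by
  by_cases h : 2 * i < m.length ∧ m.getD i ' ' = m.getD (m.length - i - 1) ' '
  · rw [loopA, dif_pos ((condA_iff a m i).mpr h)]
    conv_rhs => rw [loopA, dif_pos h]
    exact loopA_shift a m (i + 1)
  · rw [loopA, dif_neg (fun hc => h ((condA_iff a m i).mp hc))]
    conv_rhs => rw [loopA, dif_neg h]
termination_by m.length - i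
decreasing_by omega

lemma loopA_zero (a : Char) (m : List Char) :
    loopA (a :: (m ++ [a])) 0 = loopA m 0 + 1 := by
  rw [loopA, dif_pos]
  · exact loopA_shift a m 0
  · constructor
    · simp
    · have e : (a :: (m ++ [a])).length - 0 - 1 = m.length + 1 := by simp
      rw [e]
      have e2 : (a :: (m ++ [a])).getD (m.length + 1) ' ' = (m ++ [a]).getD m.length ' ' := by
        simp [List.getD]
      rw [e2]
      simp [List.getD]

lemma peelB_step (a : Char) (m : List Char) :
    peelB (a :: (m ++ [a])) = peelB m := by
  rw [peelB, dif_pos]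
  · simp
  · constructor
    · simp
    · have e : a :: (m ++ [a]) = (a :: m) ++ [a] := by simp
      rw [e, List.getLast?_concat]
      simp

lemma listA_step (a : Char) (m : List Char) : listA (a :: (m ++ [a])) = listA m := by
  unfold listA
  rw [loopA_zero]
  set j := loopA m 0 with hj
  have hlen : (a :: (m ++ [a])).length = m.length + 2 := by simp
  rw [hlen]
  by_cases hc : m.length ≤ 2 * j
  · rw [if_pos (by omega), if_pos hc]
  · rw [if_neg (by omega), if_neg hc]
    have hjm : j < m.length := by omega
    rw [PySem.List.slice_natCast, PySem.List.slice_natCast]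
    have e1 : (a :: (m ++ [a])).drop (j + 1) = m.drop j ++ [a] := by
      simp [List.drop_append_of_le_length (by omega : j ≤ m.length)]
    rw [e1]
    have e2 : m.length + 2 - (j + 1) - (j + 1) = m.length - 2 * j := by omega
    have e3 : m.length - j - j = m.length - 2 * j := by omega
    rw [e2, e3]
    rw [List.take_append_of_le_length (by simp; omega)]

lemma listB_step (a : Char) (m : List Char) : listB (a :: (m ++ [a])) = listB m := by
  unfold listB
  rw [peelB_step]

lemma getD_zero_head (l : List Char) (h : l ≠ []) : l.getD 0 ' ' = l.head h := by
  cases l with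
  | nil => exact absurd rfl h
  | cons x xs => simp [List.getD]

lemma getD_last (l : List Char) (h : l ≠ []) : l.getD (l.length - 1) ' ' = l.getLast h := by
  induction l with
  | nil => exact absurd rfl h
  | cons x xs ih =>
    cases xs with
    | nil => simp [List.getD]
    | cons y ys =>
      have hne : (y :: ys) ≠ [] := by simp
      have e : (x :: y :: ys).length - 1 = ((y :: ys).length - 1) + 1 := by simp
      rw [e, List.getLast_cons hne]
      simpa [List.getD] using ih hne

lemma main_eq (l : List Char) : listA l = listB l := by
  induction hn : l.length using Nat.strong_induction_on generalizing l with
  | _ n ih =>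
  match l with
  | [] =>
    unfold listA listB
    rw [loopA, peelB]
    simp
  | [c] =>
    unfold listA listB
    rw [loopA, dif_pos (by simp [List.getD]), loopA, dif_neg (by simp), peelB, dif_neg (by simp)]
    simp
  | x :: y :: rest =>
    set l' := x :: y :: rest with hl'
    have hne : l' ≠ [] := by simp [hl']
    have hlen2 : 2 ≤ l'.length := by simp [hl']
    by_cases heq : l'.head hne = l'.getLast hne
    · -- first == last: decompose l' = a :: (m ++ [a]) and recurse on the middle m
      have htne : (y :: rest) ≠ [] := by simp
      have hdecomp : l' = x :: ((y :: rest).dropLast ++ [(y :: rest).getLast htne]) := by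
        rw [List.dropLast_concat_getLast htne]
      have hx : (y :: rest).getLast htne = x := by
        have h1 : l'.getLast hne = (y :: rest).getLast htne := List.getLast_cons htne
        have h2 : l'.head hne = x := rfl
        rw [← h1, ← heq, h2]
      rw [hx] at hdecomp
      set m := (y :: rest).dropLast with hm
      have hmlen : m.length + 2 = l'.length := by
        simp [hm, hl']
      rw [hdecomp, listA_step, listB_step]
      exact ih m.length (by omega) m rfl
    · -- first ≠ last: A's loop stops at i = 0 and returns the whole string, as does B's peel
      have hgetD : l'.getD 0 ' ' ≠ l'.getD (l'.length - 1) ' ' := by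
        rw [getD_zero_head l' hne, getD_last l' hne]
        exact heq
      have hloop : loopA l' 0 = 0 := by
        rw [loopA, dif_neg]
        rintro ⟨h1, h2⟩
        exact hgetD (by simpa using h2)
      have hpeel : peelB l' = l' := by
        rw [peelB, dif_neg]
        rintro ⟨h1, h2⟩
        rw [List.head?_eq_some_head hne, List.getLast?_eq_some_getLast hne] at h2
        exact heq (Option.some_injective _ h2)
      unfold listA listB
      rw [hloop, hpeel, if_neg (by omega), if_neg (by omega)]
      have e : ((l'.length - 0 : Nat) : Int) = ((l'.length : Nat) : Int) := by norm_num
      rw [e, PySem.List.slice_natCast]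
      simp

-- ===== VERDICT (by name: the statement is the Claim_ definition above) =====
theorem reduceString_spec : Claim_equal_reduceString := by
  intro s _
  unfold Spec_reduceString reduceString reduceString_alt
  have h := main_eq s.toList
  unfold listA listB at h
  by_cases hA : s.toList.length ≤ 2 * loopA s.toList 0 <;>
    by_cases hB : (peelB s.toList).length ≤ 1 <;>
      simp only [hA, hB, if_pos] at h ⊢ <;>
        simp_all
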